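-- pv_equiv track=rewrite | github.com/ilovemyminutes/problem-solving | brute-force/1018.py | get_num_repaints
-- ===== SOURCE A (Python) =====
-- def get_num_repaints(patch) -> int:
--     ground_truth = [
--         [
--             ["W", "B", "W", "B", "W", "B", "W", "B"],
--             ["B", "W", "B", "W", "B", "W", "B", "W"],
--             ["W", "B", "W", "B", "W", "B", "W", "B"],
--             ["B", "W", "B", "W", "B", "W", "B", "W"],
--             ["W", "B", "W", "B", "W", "B", "W", "B"],
--             ["B", "W", "B", "W", "B", "W", "B", "W"],
--             ["W", "B", "W", "B", "W", "B", "W", "B"],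
--             ["B", "W", "B", "W", "B", "W", "B", "W"],
--         ],
--         [
--             ["B", "W", "B", "W", "B", "W", "B", "W"],
--             ["W", "B", "W", "B", "W", "B", "W", "B"],
--             ["B", "W", "B", "W", "B", "W", "B", "W"],
--             ["W", "B", "W", "B", "W", "B", "W", "B"],
--             ["B", "W", "B", "W", "B", "W", "B", "W"],
--             ["W", "B", "W", "B", "W", "B", "W", "B"],
--             ["B", "W", "B", "W", "B", "W", "B", "W"],
--             ["W", "B", "W", "B", "W", "B", "W", "B"],
--         ],
--     ]
--     num_repaints_list = []
--
--     for case in ground_truth: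
--         num_repaints = 0
--         for i in range(8):
--             for color1, color2 in zip(patch[i], case[i]):
--                 if color1 != color2:
--                     num_repaints += 1
--         num_repaints_list.append(num_repaints)
--
--     return min(num_repaints_list)
-- ===== SOURCE B (Python) =====
-- def get_num_repaints(patch) -> int:
--     # Count only mismatches against board 1, plus a tally of cells that are
--     # neither "W" nor "B" (those mismatch BOTH boards); the board-2 count is
--     # then derived algebraically: mis1 + mis2 = total + off.
--     total = off = mis1 = 0
--     for i in range(8):
--         for j, c in enumerate(patch[i][:8]):
--             total += 1
--             if c != "W" and c != "B":
--                 off += 1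
--                 mis1 += 1
--             elif (c == "W") != ((i + j) % 2 == 0):
--                 mis1 += 1
--     return min(mis1, total + off - mis1)
-- ===== Notes on version B (the rewrite author's own statement) =====
-- stated objective: alternative
-- what changed: Instead of counting mismatches against two stored template boards, B counts mismatches against board 1 only (plus the number of non-W/B cells and the total cell count) and derives the board-2 count from the identity mis1 + mis2 = total + off, since every W/B cell mismatches exactly one board and every other cell mismatches both.
import Mathlib
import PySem

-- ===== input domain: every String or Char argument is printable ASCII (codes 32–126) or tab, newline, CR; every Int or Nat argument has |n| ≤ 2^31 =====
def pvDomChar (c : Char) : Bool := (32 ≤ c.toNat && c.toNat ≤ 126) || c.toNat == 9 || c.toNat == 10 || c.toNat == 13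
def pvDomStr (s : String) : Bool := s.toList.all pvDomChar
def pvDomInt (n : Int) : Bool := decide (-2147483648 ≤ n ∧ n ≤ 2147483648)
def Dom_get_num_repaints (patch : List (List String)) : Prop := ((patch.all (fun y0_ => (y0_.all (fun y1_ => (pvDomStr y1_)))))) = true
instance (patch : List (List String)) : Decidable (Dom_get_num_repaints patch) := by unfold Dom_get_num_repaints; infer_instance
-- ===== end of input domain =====

-- B counts mismatches against board 1 only (plus the non-W/B cell tally and the total)
-- and derives the board-2 count from mis1 + mis2 = total + off; objective: alternative.


-- ===== PORT A =====
def pvCase1 : List (List String) :=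
  [ ["W","B","W","B","W","B","W","B"],
    ["B","W","B","W","B","W","B","W"],
    ["W","B","W","B","W","B","W","B"],
    ["B","W","B","W","B","W","B","W"],
    ["W","B","W","B","W","B","W","B"],
    ["B","W","B","W","B","W","B","W"],
    ["W","B","W","B","W","B","W","B"],
    ["B","W","B","W","B","W","B","W"] ]

def pvCase2 : List (List String) :=
  [ ["B","W","B","W","B","W","B","W"],
    ["W","B","W","B","W","B","W","B"],
    ["B","W","B","W","B","W","B","W"],
    ["W","B","W","B","W","B","W","B"],
    ["B","W","B","W","B","W","B","W"],
    ["W","B","W","B","W","B","W","B"],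
    ["B","W","B","W","B","W","B","W"],
    ["W","B","W","B","W","B","W","B"] ]

def get_num_repaints (patch : List (List String)) : Int :=
  let ground_truth : List (List (List String)) := [pvCase1, pvCase2]
  let nums : List Int := ground_truth.foldl (fun acc cas =>
    let n : Int := (PySem.List.pyRange 0 8 1).foldl (fun n i =>
      (((PySem.List.pyGet? patch i).getD []).zip ((PySem.List.pyGet? cas i).getD [])).foldl
        (fun n p => if p.1 ≠ p.2 then n + 1 else n) n) 0
    acc ++ [n]) []
  (PySem.List.min? nums (fun x => x)).getD 0

-- ===== PORT B =====
def get_num_repaints_alt (patch : List (List String)) : Int :=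
  let st : Int × Int × Int := (PySem.List.pyRange 0 8 1).foldl (fun st i =>
    (PySem.List.enumerate (PySem.List.slice ((PySem.List.pyGet? patch i).getD []) none (some 8)) 0).foldl
      (fun (st : Int × Int × Int) jc =>
        let total := st.1 + 1
        if jc.2 ≠ "W" ∧ jc.2 ≠ "B" then (total, st.2.1 + 1, st.2.2 + 1)
        else if (decide (jc.2 = "W")) ≠ (decide (PySem.Int.mod (i + jc.1) 2 = 0)) then (total, st.2.1, st.2.2 + 1)
        else (total, st.2.1, st.2.2)) st) (0, 0, 0)
  min st.2.2 (st.1 + st.2.1 - st.2.2)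

-- ===== PRECONDITION & SPEC =====
-- A indexes patch[i] for i in range(8), so it raises IndexError when patch has fewer than 8 rows.
def Pre_get_num_repaints (patch : List (List String)) : Prop := 8 ≤ patch.length
instance (patch : List (List String)) : Decidable (Pre_get_num_repaints patch) := by unfold Pre_get_num_repaints; infer_instance
def pvWitness_get_num_repaints : List (List String) :=
  [["W","B"], ["B","W"], ["W","W"], [], ["B"], ["W","B","W"], ["B"], ["W"]]
def Spec_get_num_repaints (patch : List (List String)) (out : Int) : Prop := out = get_num_repaints_alt patch
instance (patch : List (List String)) (out : Int) : Decidable (Spec_get_num_repaints patch out) := by unfold Spec_get_num_repaints; infer_instance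

-- ===== CLAIM (what is proved, stated in full; the proofs are below) =====
def Claim_equal_get_num_repaints : Prop := ∀ (patch : List (List String)), Dom_get_num_repaints patch → Pre_get_num_repaints patch → Spec_get_num_repaints patch (get_num_repaints patch)

-- ===== LEMMAS AND PROOFS =====

/-- expected colour of board 1 at diagonal parity p -/
def pvColour (p : Nat) : String := if p % 2 = 0 then "W" else "B"

/-- mismatch count of a row against the parity colouring starting at parity p -/
def pvCnt (p : Nat) : List String → Int
  | [] => 0
  | s :: rest => (if s ≠ pvColour p then 1 else 0) + pvCnt (p + 1) rest

/-- number of cells that are neither "W" nor "B" -/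
def pvOff : List String → Int
  | [] => 0
  | s :: rest => (if s ≠ "W" ∧ s ≠ "B" then 1 else 0) + pvOff rest

lemma pvCnt_parity (t : List String) : ∀ p, pvCnt (p + 2) t = pvCnt p t := by
  induction t with
  | nil => intro p; rfl
  | cons s rest ih =>
      intro p
      by_cases hp : p % 2 = 0 <;>
        simp [pvCnt, pvColour, Nat.add_mod_right, hp, show p + 2 + 1 = p + 1 + 2 by omega, ih]

/-- every W/B cell mismatches exactly one of the two boards; every other cell mismatches both -/
lemma pvCnt_compl (t : List String) : ∀ p, pvCnt (p + 1) t = (t.length : Int) + pvOff t - pvCnt p t := by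
  induction t with
  | nil => intro p; simp [pvCnt, pvOff]
  | cons s rest ih =>
      intro p
      have hpar : pvCnt (p + 1 + 1) rest = pvCnt p rest := pvCnt_parity rest p
      have hcell : (if s ≠ pvColour (p + 1) then (1:Int) else 0)
          = 1 + (if s ≠ "W" ∧ s ≠ "B" then (1:Int) else 0) - (if s ≠ pvColour p then (1:Int) else 0) := by
        by_cases hp : p % 2 = 0
        · have h1 : pvColour p = "W" := by simp [pvColour, hp]
          have h2 : pvColour (p + 1) = "B" := by simp [pvColour, Nat.add_mod, hp]
          rw [h1, h2]; by_cases hw : s = "W" <;> by_cases hb : s = "B" <;> simp_all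
        · have h1 : pvColour p = "B" := by simp [pvColour, hp]
          have h2 : pvColour (p + 1) = "W" := by simp [pvColour, Nat.add_mod]; omega
          rw [h1, h2]; by_cases hw : s = "W" <;> by_cases hb : s = "B" <;> simp_all
      simp only [pvCnt, pvOff, hpar, ih p, List.length_cons, hcell]
      push_cast; ring

/-- B's inner enumerate-fold tracks length, non-W/B count and board-1 mismatches -/
lemma pvEnumFold (i : Int) (hi : 0 ≤ i) (t : List String) : ∀ (s : Int), 0 ≤ s → ∀ (st : Int × Int × Int),
    (PySem.List.enumerate t s).foldl
      (fun (st : Int × Int × Int) jc =>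
        let total := st.1 + 1
        if jc.2 ≠ "W" ∧ jc.2 ≠ "B" then (total, st.2.1 + 1, st.2.2 + 1)
        else if (decide (jc.2 = "W")) ≠ (decide (PySem.Int.mod (i + jc.1) 2 = 0)) then (total, st.2.1, st.2.2 + 1)
        else (total, st.2.1, st.2.2)) st
      = (st.1 + t.length, st.2.1 + pvOff t, st.2.2 + pvCnt (i + s).toNat t) := by
  induction t with
  | nil => intro s hs st; simp [PySem.List.enumerate_nil, pvCnt, pvOff]
  | cons x rest ih =>
      intro s hs st
      rw [PySem.List.enumerate_cons, List.foldl_cons]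
      rw [ih (s + 1) (by omega)]
      have hm : PySem.Int.mod (i + s) 2 = (i + s) % 2 :=
        PySem.Int.mod_eq_emod_of_pos (by omega)
      have h1 : (i + (s + 1)).toNat = (i + s).toNat + 1 := by omega
      have hpar : (PySem.Int.mod (i + s) 2 = 0) ↔ ((i + s).toNat % 2 = 0) := by rw [hm]; omega
      simp only [h1, pvCnt, pvOff]
      by_cases hoff : x ≠ "W" ∧ x ≠ "B"
      · have hcol : x ≠ pvColour (i + s).toNat := by
          unfold pvColour; split_ifs
          · exact hoff.1
          · exact hoff.2
        simp only [if_pos hoff, if_pos hcol]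
        refine Prod.ext ?_ (Prod.ext ?_ ?_) <;> simp <;> ring
      · by_cases hw : x = "W"
        · subst hw
          have hoff' : ¬ ("W" ≠ "W" ∧ "W" ≠ "B") := by simp
          by_cases hp : PySem.Int.mod (i + s) 2 = 0
          · have e1 : (i + s).toNat % 2 = 0 := hpar.mp hp
            have hcol : ¬ ("W" ≠ pvColour (i + s).toNat) := by simp [pvColour, e1]
            rw [if_neg hoff', if_neg (by rw [hp]; simp), if_neg hcol]
            refine Prod.ext ?_ (Prod.ext ?_ ?_) <;> simp <;> ring
          · have e1 : ¬ ((i + s).toNat % 2 = 0) := fun h => hp (hpar.mpr h)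
            have hcol : ("W" : String) ≠ pvColour (i + s).toNat := by simp [pvColour, e1]
            rw [if_neg hoff', if_pos (by rw [decide_eq_false hp]; simp), if_pos hcol]
            refine Prod.ext ?_ (Prod.ext ?_ ?_) <;> simp <;> ring
        · have hb : x = "B" := by
            rcases not_and_or.mp hoff with h | h
            · exact absurd (not_not.mp h) hw
            · exact not_not.mp h
          subst hb
          have hoff' : ¬ ("B" ≠ "W" ∧ "B" ≠ "B") := by simp
          by_cases hp : PySem.Int.mod (i + s) 2 = 0
          · have e1 : (i + s).toNat % 2 = 0 := hpar.mp hp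
            have hcol : ("B" : String) ≠ pvColour (i + s).toNat := by simp [pvColour, e1]
            rw [if_neg hoff', if_pos (by rw [hp]; simp), if_pos hcol]
            refine Prod.ext ?_ (Prod.ext ?_ ?_) <;> simp <;> ring
          · have e1 : ¬ ((i + s).toNat % 2 = 0) := fun h => hp (hpar.mpr h)
            have hcol : ¬ (("B" : String) ≠ pvColour (i + s).toNat) := by simp [pvColour, e1]
            rw [if_neg hoff', if_neg (by rw [decide_eq_false hp]; simp), if_neg hcol]
            refine Prod.ext ?_ (Prod.ext ?_ ?_) <;> simp <;> ring

/-- A's ground-truth rows, generated from a starting parity -/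
def pvGenRow (p : Nat) : Nat → List String
  | 0 => []
  | k + 1 => pvColour p :: pvGenRow (p + 1) k

/-- A's inner zip-fold against a generated ground-truth row counts parity mismatches -/
lemma pvZipFold (row : List String) : ∀ (p k : Nat) (n : Int),
    (row.zip (pvGenRow p k)).foldl (fun n q => if q.1 ≠ q.2 then n + 1 else n) n
      = n + pvCnt p (row.take k) := by
  induction row with
  | nil => intro p k n; cases k <;> simp [pvGenRow, pvCnt]
  | cons s rest ih =>
      intro p k n
      cases k with
      | zero => simp [pvGenRow, pvCnt]
      | succ k =>
          simp only [pvGenRow, List.zip_cons_cons, List.foldl_cons, List.take_succ_cons, pvCnt, ih]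
          split_ifs <;> ring

set_option maxHeartbeats 2000000 in
-- ===== VERDICT (by name: the statement is the Claim_ definition above) =====
theorem get_num_repaints_spec : Claim_equal_get_num_repaints := by
  intro patch _ hpre
  unfold Pre_get_num_repaints at hpre
  unfold Spec_get_num_repaints
  rcases patch with _ | ⟨r0, patch⟩; · simp at hpre
  rcases patch with _ | ⟨r1, patch⟩; · simp at hpre
  rcases patch with _ | ⟨r2, patch⟩; · simp at hpre
  rcases patch with _ | ⟨r3, patch⟩; · simp at hpre
  rcases patch with _ | ⟨r4, patch⟩; · simp at hpre
  rcases patch with _ | ⟨r5, patch⟩; · simp at hpre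
  rcases patch with _ | ⟨r6, patch⟩; · simp at hpre
  rcases patch with _ | ⟨r7, rest⟩; · simp at hpre
  have hrange : PySem.List.pyRange 0 8 1 = [0, 1, 2, 3, 4, 5, 6, 7] := by decide
  have hsl : ∀ row : List String, PySem.List.slice row none (some 8) = row.take 8 := by
    intro row; simpa using PySem.List.slice_to_natCast (xs := row) (b := 8)
  have h0 : PySem.List.pyGet? (r0 :: r1 :: r2 :: r3 :: r4 :: r5 :: r6 :: r7 :: rest) 0 = some r0 := by simp [pysem]
  have h1 : PySem.List.pyGet? (r0 :: r1 :: r2 :: r3 :: r4 :: r5 :: r6 :: r7 :: rest) 1 = some r1 := by simp [pysem]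
  have h2 : PySem.List.pyGet? (r0 :: r1 :: r2 :: r3 :: r4 :: r5 :: r6 :: r7 :: rest) 2 = some r2 := by simp [pysem]
  have h3 : PySem.List.pyGet? (r0 :: r1 :: r2 :: r3 :: r4 :: r5 :: r6 :: r7 :: rest) 3 = some r3 := by simp [pysem]
  have h4 : PySem.List.pyGet? (r0 :: r1 :: r2 :: r3 :: r4 :: r5 :: r6 :: r7 :: rest) 4 = some r4 := by simp [pysem]
  have h5 : PySem.List.pyGet? (r0 :: r1 :: r2 :: r3 :: r4 :: r5 :: r6 :: r7 :: rest) 5 = some r5 := by simp [pysem]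
  have h6 : PySem.List.pyGet? (r0 :: r1 :: r2 :: r3 :: r4 :: r5 :: r6 :: r7 :: rest) 6 = some r6 := by simp [pysem]
  have h7 : PySem.List.pyGet? (r0 :: r1 :: r2 :: r3 :: r4 :: r5 :: r6 :: r7 :: rest) 7 = some r7 := by simp [pysem]
  have ha0 : (PySem.List.pyGet? pvCase1 0).getD [] = pvGenRow 0 8 := by decide
  have ha1 : (PySem.List.pyGet? pvCase1 1).getD [] = pvGenRow 1 8 := by decide
  have ha2 : (PySem.List.pyGet? pvCase1 2).getD [] = pvGenRow 0 8 := by decide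
  have ha3 : (PySem.List.pyGet? pvCase1 3).getD [] = pvGenRow 1 8 := by decide
  have ha4 : (PySem.List.pyGet? pvCase1 4).getD [] = pvGenRow 0 8 := by decide
  have ha5 : (PySem.List.pyGet? pvCase1 5).getD [] = pvGenRow 1 8 := by decide
  have ha6 : (PySem.List.pyGet? pvCase1 6).getD [] = pvGenRow 0 8 := by decide
  have ha7 : (PySem.List.pyGet? pvCase1 7).getD [] = pvGenRow 1 8 := by decide
  have hb0 : (PySem.List.pyGet? pvCase2 0).getD [] = pvGenRow 1 8 := by decide
  have hb1 : (PySem.List.pyGet? pvCase2 1).getD [] = pvGenRow 0 8 := by decide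
  have hb2 : (PySem.List.pyGet? pvCase2 2).getD [] = pvGenRow 1 8 := by decide
  have hb3 : (PySem.List.pyGet? pvCase2 3).getD [] = pvGenRow 0 8 := by decide
  have hb4 : (PySem.List.pyGet? pvCase2 4).getD [] = pvGenRow 1 8 := by decide
  have hb5 : (PySem.List.pyGet? pvCase2 5).getD [] = pvGenRow 0 8 := by decide
  have hb6 : (PySem.List.pyGet? pvCase2 6).getD [] = pvGenRow 1 8 := by decide
  have hb7 : (PySem.List.pyGet? pvCase2 7).getD [] = pvGenRow 0 8 := by decide
  simp only [get_num_repaints, get_num_repaints_alt, hrange,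
    List.foldl_cons, List.foldl_nil, h0, h1, h2, h3, h4, h5, h6, h7,
    ha0, ha1, ha2, ha3, ha4, ha5, ha6, ha7, hb0, hb1, hb2, hb3, hb4, hb5, hb6, hb7,
    Option.getD_some, hsl]
  simp only [pvZipFold]
  rw [pvEnumFold 0 (by norm_num) (List.take 8 r0) 0 (by norm_num)]
  rw [pvEnumFold 1 (by norm_num) (List.take 8 r1) 0 (by norm_num)]
  rw [pvEnumFold 2 (by norm_num) (List.take 8 r2) 0 (by norm_num)]
  rw [pvEnumFold 3 (by norm_num) (List.take 8 r3) 0 (by norm_num)]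
  rw [pvEnumFold 4 (by norm_num) (List.take 8 r4) 0 (by norm_num)]
  rw [pvEnumFold 5 (by norm_num) (List.take 8 r5) 0 (by norm_num)]
  rw [pvEnumFold 6 (by norm_num) (List.take 8 r6) 0 (by norm_num)]
  rw [pvEnumFold 7 (by norm_num) (List.take 8 r7) 0 (by norm_num)]
  have hmin : ∀ a b : Int, (PySem.List.min? ([] ++ [a] ++ [b]) (fun x => x)).getD 0 = min a b := by
    intro a b
    simp [PySem.List.min?_id_cons]
  rw [hmin]
  have hd : ∀ t, pvCnt 1 t = (t.length : Int) + pvOff t - pvCnt 0 t := fun t => pvCnt_compl t 0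
  have hc2 : ∀ t, pvCnt 2 t = pvCnt 0 t := fun t => by
    have := pvCnt_parity t 0; norm_num at this ⊢; exact this
  have hc3 : ∀ t, pvCnt 3 t = pvCnt 1 t := fun t => by
    have := pvCnt_parity t 1; norm_num at this ⊢; exact this
  have hc4 : ∀ t, pvCnt 4 t = pvCnt 2 t := fun t => by
    have := pvCnt_parity t 2; norm_num at this ⊢; exact this
  have hc5 : ∀ t, pvCnt 5 t = pvCnt 3 t := fun t => by
    have := pvCnt_parity t 3; norm_num at this ⊢; exact this
  have hc6 : ∀ t, pvCnt 6 t = pvCnt 4 t := fun t => by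
    have := pvCnt_parity t 4; norm_num at this ⊢; exact this
  have hc7 : ∀ t, pvCnt 7 t = pvCnt 5 t := fun t => by
    have := pvCnt_parity t 5; norm_num at this ⊢; exact this
  norm_num
  simp only [Int.reduceToNat]
  simp only [hc7, hc6, hc5, hc4, hc3, hc2]
  simp only [hd]
  congr 1 <;> (simp only [List.length_take]; push_cast; ring)
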